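-- pv_equiv track=rewrite | github.com/BE-Mesh/BE_MESP-data_presenter | imports/manipulator.py | __checkConvergenceMessage
-- ===== SOURCE A (Python) =====
-- def __checkConvergenceMessage(userList,payload):
--
--     pl_split = payload.split('-')
--     uL = list(userList)
--
--     for index, elem in enumerate(pl_split):
--
--         if elem in uL:
--             uL.remove(elem)
--     if len(uL) == 0:
--         return 0,True
--
--     return 0,False
-- ===== SOURCE B (Python) =====
-- def __checkConvergenceMessage(userList, payload):
--     tokens = payload.split('-')
--     need = {}
--     for u in userList:
--         need[u] = need.get(u, 0) + 1
--     have = {}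
--     for t in tokens:
--         have[t] = have.get(t, 0) + 1
--     ok = all(have.get(e, 0) >= c for e, c in need.items())
--     return 0, ok
-- ===== Notes on version B (the rewrite author's own statement) =====
-- stated objective: idiomatic
-- what changed: Replaces the scan-payload-and-remove-one-at-a-time loop over a mutable copy of userList by two frequency tables (Counter-style dicts) and a submultiset-containment test: every required count is met by the payload-token count.
import Mathlib
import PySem

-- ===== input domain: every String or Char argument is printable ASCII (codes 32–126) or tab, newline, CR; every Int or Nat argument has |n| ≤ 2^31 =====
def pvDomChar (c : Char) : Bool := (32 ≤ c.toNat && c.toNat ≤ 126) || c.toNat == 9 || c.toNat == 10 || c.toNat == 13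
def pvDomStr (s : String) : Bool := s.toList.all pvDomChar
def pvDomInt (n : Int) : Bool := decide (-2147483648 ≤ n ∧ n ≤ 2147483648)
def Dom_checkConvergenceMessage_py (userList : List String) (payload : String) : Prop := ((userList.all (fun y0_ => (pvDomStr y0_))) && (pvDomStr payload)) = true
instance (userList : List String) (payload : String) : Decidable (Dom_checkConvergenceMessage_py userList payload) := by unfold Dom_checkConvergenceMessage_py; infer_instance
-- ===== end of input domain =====

-- B replaces A's scan-and-remove loop over a mutable copy of userList by two frequency
-- tables and a submultiset-containment test (idiomatic Counter style; same results).


-- ===== PORT A =====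
def checkConvergenceMessage_py (userList : List String) (payload : String) : Int × Bool :=
  let pl_split := (PySem.Str.split? payload "-").getD []
  let uL := userList
  let uL := (PySem.List.enumerate pl_split 0).foldl
    (fun uL p => if uL.contains p.2 then ((PySem.List.remove? uL p.2).getD uL) else uL) uL
  if uL.length = 0 then (0, true) else (0, false)

-- ===== PORT B =====
def checkConvergenceMessage_py_alt (userList : List String) (payload : String) : Int × Bool :=
  let tokens := (PySem.Str.split? payload "-").getD []
  let need := userList.foldl (fun d u => d.insert u (d.getD u 0 + 1)) (PySem.Dict.empty : PySem.Dict String Int)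
  let have_ := tokens.foldl (fun d t => d.insert t (d.getD t 0 + 1)) (PySem.Dict.empty : PySem.Dict String Int)
  let ok := need.items.all (fun p => have_.getD p.1 0 ≥ p.2)
  (0, ok)

-- ===== PRECONDITION & SPEC =====
def Spec_checkConvergenceMessage_py (userList : List String) (payload : String) (out : Int × Bool) : Prop := out = checkConvergenceMessage_py_alt userList payload
instance (userList : List String) (payload : String) (out : Int × Bool) : Decidable (Spec_checkConvergenceMessage_py userList payload out) := by unfold Spec_checkConvergenceMessage_py; infer_instance

-- ===== CLAIM (what is proved, stated in full; the proofs are below) =====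
def Claim_equal_checkConvergenceMessage_py : Prop := ∀ (userList : List String) (payload : String), Dom_checkConvergenceMessage_py userList payload → Spec_checkConvergenceMessage_py userList payload (checkConvergenceMessage_py userList payload)

-- ===== LEMMAS AND PROOFS =====

-- A's loop only uses the element of each enumerate pair
theorem foldl_enumerate_snd :
    ∀ (xs : List String) (s : Int) (a : List String),
      (PySem.List.enumerate xs s).foldl
          (fun acc p => if acc.contains p.2 then ((PySem.List.remove? acc p.2).getD acc) else acc) a
        = xs.foldl (fun uL t => if uL.contains t then ((PySem.List.remove? uL t).getD uL) else uL) a := by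
  intro xs
  induction xs with
  | nil => intro s a; rfl
  | cons x xs ih =>
    intro s a
    simp only [PySem.List.enumerate, List.foldl]
    exact ih (s + 1) _

-- count in A's remove loop result: truncated difference of counts
theorem count_removeLoop (tokens : List String) :
    ∀ (uL : List String) (e : String),
      ((tokens.foldl
        (fun uL t => if uL.contains t then ((PySem.List.remove? uL t).getD uL) else uL) uL).count e)
        = uL.count e - tokens.count e := by
  induction tokens with
  | nil => intro uL e; simp
  | cons t ts ih =>
    intro uL e
    by_cases hmem : t ∈ uL
    · have hc : uL.contains t = true := by simpa using hmem
      have hrem : (PySem.List.remove? uL t).getD uL = uL.erase t := by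
        rw [PySem.List.remove?_eq_some_erase uL t hmem]; rfl
      have hcnt : (uL.erase t).count e = uL.count e - if (t == e) = true then 1 else 0 :=
        List.count_erase
      have hpos : 1 ≤ uL.count t := List.one_le_count_iff.mpr hmem
      simp only [List.foldl, hc, if_true, hrem, ih, hcnt, List.count_cons]
      by_cases het : e = t
      · subst het; simp; omega
      · have h2 : (t == e) = false := by simp [Ne.symm het]
        simp [h2]
    · have hc : uL.contains t = false := by simpa using hmem
      have hzero : uL.count t = 0 := List.count_eq_zero.mpr hmem
      simp only [List.foldl, hc, Bool.false_eq_true, if_false, ih, List.count_cons]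
      by_cases het : e = t
      · subst het; omega
      · have h2 : (t == e) = false := by simp [Ne.symm het]
        simp [h2]

-- A's loop result is empty iff payload tokens cover userList as a multiset
theorem removeLoop_nil_iff (tokens uL : List String) :
    (tokens.foldl
        (fun uL t => if uL.contains t then ((PySem.List.remove? uL t).getD uL) else uL) uL) = []
      ↔ ∀ e ∈ uL, uL.count e ≤ tokens.count e := by
  constructor
  · intro h e he
    have h1 := count_removeLoop tokens uL e
    rw [h] at h1
    simp at h1
    have hpos : 1 ≤ uL.count e := List.one_le_count_iff.mpr he
    omega
  · intro h
    rw [List.eq_nil_iff_forall_not_mem]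
    intro e hmem
    have h1 := count_removeLoop tokens uL e
    have h2 : 1 ≤ (tokens.foldl
        (fun uL t => if uL.contains t then ((PySem.List.remove? uL t).getD uL) else uL) uL).count e :=
      List.one_le_count_iff.mpr hmem
    by_cases he : e ∈ uL
    · have := h e he; omega
    · have : uL.count e = 0 := List.count_eq_zero.mpr he
      omega

-- closed form of A's result
theorem A_eq (u : List String) (p : String) :
    checkConvergenceMessage_py u p
      = (0, decide (∀ e ∈ u, u.count e ≤ ((PySem.Str.split? p "-").getD []).count e)) := by
  simp only [checkConvergenceMessage_py]
  rw [foldl_enumerate_snd]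
  by_cases h : (((PySem.Str.split? p "-").getD []).foldl
      (fun uL t => if uL.contains t then ((PySem.List.remove? uL t).getD uL) else uL) u) = []
  · rw [h]
    have hcov := (removeLoop_nil_iff ((PySem.Str.split? p "-").getD []) u).mp h
    simp
    exact hcov
  · have hlen : ¬ (((PySem.Str.split? p "-").getD []).foldl
        (fun uL t => if uL.contains t then ((PySem.List.remove? uL t).getD uL) else uL) u).length = 0 := by
      simpa [List.length_eq_zero_iff] using h
    rw [if_neg hlen]
    have hna : ¬ ∀ e ∈ u, u.count e ≤ ((PySem.Str.split? p "-").getD []).count e :=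
      fun hall => h ((removeLoop_nil_iff _ u).mpr hall)
    simp [hna]

-- closed form of B's result
theorem B_eq (u : List String) (p : String) :
    checkConvergenceMessage_py_alt u p
      = (0, (PySem.Set.ofList u).all (fun k =>
          decide ((u.count k : Int) ≤ (((PySem.Str.split? p "-").getD []).count k : Int)))) := by
  simp only [checkConvergenceMessage_py_alt]
  simp [PySem.Dict.foldl_insert_getD_add_one_eq_counter, PySem.Dict.items_counter,
    PySem.Dict.getD_counter, List.all_map, Function.comp_def, ge_iff_le, Nat.cast_le]

-- the two boolean tests agree
theorem bools_eq (u tokens : List String) :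
    decide (∀ e ∈ u, u.count e ≤ tokens.count e)
      = (PySem.Set.ofList u).all (fun k => decide ((u.count k : Int) ≤ (tokens.count k : Int))) := by
  have key : ((PySem.Set.ofList u).all
      (fun k => decide ((u.count k : Int) ≤ (tokens.count k : Int))) = true)
      ↔ (∀ e ∈ u, u.count e ≤ tokens.count e) := by
    rw [List.all_eq_true]
    constructor
    · intro h e he
      have := h e ((PySem.Set.mem_ofList u e).mpr he)
      simpa using this
    · intro h k hk
      have := h k ((PySem.Set.mem_ofList u k).mp hk)
      simpa using this
  by_cases h : ∀ e ∈ u, u.count e ≤ tokens.count e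
  · rw [key.mpr h]
    simp
    exact h
  · have hf : (PySem.Set.ofList u).all
        (fun k => decide ((u.count k : Int) ≤ (tokens.count k : Int))) = false := by
      cases hb : (PySem.Set.ofList u).all
          (fun k => decide ((u.count k : Int) ≤ (tokens.count k : Int)))
      · rfl
      · exact absurd (key.mp hb) h
    rw [hf]
    simpa using h

-- ===== VERDICT (by name: the statement is the Claim_ definition above) =====
theorem checkConvergenceMessage_py_spec : Claim_equal_checkConvergenceMessage_py := by
  intro userList payload _
  unfold Spec_checkConvergenceMessage_py
  rw [A_eq, B_eq, bools_eq]
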